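-- pv_equiv track=rewrite | github.com/BBstudyFighting/algorithm | 18주차/SUYEON/SQL/programmers_coding test21.py | solution
-- ===== SOURCE A (Python) =====
-- from collections import deque
--
-- def solution(rectangle, characterX, characterY, itemX, itemY):
--     for rec in rectangle:
--         rec[0] *=2
--         rec[1] *=2
--         rec[2] *=2
--         rec[3] *=2
--     characterX *=2
--     characterY *=2
--     itemX *= 2
--     itemY *= 2
--     visited = [[0]*101 for _ in range(101)]
--     answer = 202
--     # U D R L
--     moves = [(0,1),(0,-1),(1,0),(-1,0)]
--     q = deque([(characterX,characterY,0)])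
--     visited[characterX][characterY] = 1
--     checking_rec = [0 for _ in range(len(rectangle))]
--
--     while q:
--         x, y, cnt = q.popleft()
--         if (x,y) == (itemX,itemY) and answer > cnt:
--             answer = cnt
--         for move in moves:
--             dx, dy = move
--             next_x = x + dx
--             next_y = y + dy
--             if not (1<=next_x<=100 and 1<=next_y<=100):
--                 # 좌표 범위를 벗어난다면
--                 continue
--             if visited[next_x][next_y] == 1:
--                 # 방문한 적이 있다면
--                 continue
--             for i,rec in enumerate(rectangle):
--                 s_x, s_y, e_x, e_y = rec
--                 # 좌표가 직사각형 바깥으로 나갔다면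
--                 if (next_x < s_x or next_x > e_x) or (next_y < s_y or next_y > e_y):
--                     # 일단 여기선 문제가 안되는데, 모두 다 안되면 X
--                     checking_rec[i] = -1
--                     continue
--                 # 좌표가 직사각형 중앙에 있다면
--                 if (s_x < next_x < e_x) and (s_y < next_y < e_y):
--                     checking_rec[i] = -2
--                     break
--                 checking_rec[i] = 1
--             if -2 in checking_rec or 1 not in checking_rec:
--                 continue
--             visited[next_x][next_y] = 1
--             q.append((next_x,next_y,cnt+1))
--     return answer//2
-- ===== SOURCE B (Python) =====
-- from collections import deque
--
-- def solution(rectangle, characterX, characterY, itemX, itemY):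
--     # Doubles rectangle's rows in place (same observable mutation as the original).
--     for rec in rectangle:
--         for i in range(4):
--             rec[i] *= 2
--     characterX *= 2
--     characterY *= 2
--     itemX *= 2
--     itemY *= 2
--     # Precompute the set of passable boundary cells of the doubled grid once.
--     valid = {(x, y)
--              for x in range(1, 101) for y in range(1, 101)
--              if any(sx <= x <= ex and sy <= y <= ey for sx, sy, ex, ey in rectangle)
--              and not any(sx < x < ex and sy < y < ey for sx, sy, ex, ey in rectangle)}
--     dist = {(characterX, characterY): 0}
--     q = deque([(characterX, characterY)])
--     best = 202
--     while q:
--         x, y = q.popleft()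
--         if (x, y) == (itemX, itemY) and dist[(x, y)] < best:
--             best = dist[(x, y)]
--         for n in ((x, y + 1), (x, y - 1), (x + 1, y), (x - 1, y)):
--             if n in valid and n not in dist:
--                 dist[n] = dist[(x, y)] + 1
--                 q.append(n)
--     return best // 2
-- ===== Notes on version B (the rewrite author's own statement) =====
-- stated objective: alternative
-- what changed: B precomputes the set of passable grid cells once (replacing A's per-neighbour rectangle scan through the stateful checking_rec array) and runs the BFS with a distance dictionary instead of A's 101x101 visited matrix with counts carried in the queue.
-- outside the precondition, e.g. on solution([[1, 1, 2, 2, 3]], -5, -5, -5, -5): A returns 0, B raises ValueError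
import Mathlib
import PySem

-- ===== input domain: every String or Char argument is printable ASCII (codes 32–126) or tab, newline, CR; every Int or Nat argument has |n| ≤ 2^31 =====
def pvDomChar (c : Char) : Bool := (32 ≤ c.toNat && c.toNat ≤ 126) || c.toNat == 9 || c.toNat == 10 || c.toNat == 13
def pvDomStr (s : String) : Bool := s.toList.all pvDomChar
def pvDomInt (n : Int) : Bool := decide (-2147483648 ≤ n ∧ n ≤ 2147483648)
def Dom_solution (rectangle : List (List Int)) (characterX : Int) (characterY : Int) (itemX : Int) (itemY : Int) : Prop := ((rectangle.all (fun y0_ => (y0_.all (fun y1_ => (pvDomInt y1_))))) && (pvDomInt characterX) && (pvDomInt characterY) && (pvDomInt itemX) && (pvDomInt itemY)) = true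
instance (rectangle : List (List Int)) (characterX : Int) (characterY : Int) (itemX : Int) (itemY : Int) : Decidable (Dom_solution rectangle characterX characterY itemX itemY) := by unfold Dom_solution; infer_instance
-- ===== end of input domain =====

-- B replaces A's per-neighbour rectangle scan through the stateful `checking_rec` array with a
-- precomputed set of passable cells, and the visited matrix + counts-in-queue with a distance
-- dictionary (objective: alternative, not claimed faster).  Both Pythons mutate `rectangle` in
-- place identically; the equivalence proved here is about the return value.

-- ===== PORT A =====
-- rec[0]*=2 … rec[3]*=2 ; indices 0..3 are nonnegative and in range under Pre_ (row length 4),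
-- where List.set/getD are Python-exact (Python raises on shorter rows — excluded by Pre_).
def pvDouble4 (rec : List Int) : List Int :=
  let r0 := rec.set 0 (rec.getD 0 0 * 2)
  let r1 := r0.set 1 (r0.getD 1 0 * 2)
  let r2 := r1.set 2 (r1.getD 2 0 * 2)
  r2.set 3 (r2.getD 3 0 * 2)

-- Python's visited[cX][cY] = 1 wraps a negative index once: i < 0 reads as i + 101.
def pvWrap (i : Int) : Int := if i < 0 then i + 101 else i

-- reads/writes at in-grid coordinates 1..100 (nonnegative, in range: exact for Python)
def pvCell (visited : List (List Int)) (i j : Int) : Int :=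
  (visited.getD i.toNat []).getD j.toNat 0

def pvSetCell (visited : List (List Int)) (i j : Int) (v : Int) : List (List Int) :=
  visited.set i.toNat ((visited.getD i.toNat []).set j.toNat v)

-- the `for i,rec in enumerate(rectangle)` loop writing checking_rec[i], with `break` on -2;
-- structural recursion over the rectangles zipped with the current checking_rec cells
def pvScanA (nx ny : Int) : List (List Int) → List Int → List Int
  | [], cr => cr
  | rec :: rest, cr =>
    match cr with
    | [] => []
    | _ :: cs =>
      match rec with
      | [sx, sy, ex, ey] =>
        if nx < sx ∨ nx > ex ∨ ny < sy ∨ ny > ey then (-1) :: pvScanA nx ny rest cs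
        else if sx < nx ∧ nx < ex ∧ sy < ny ∧ ny < ey then (-2) :: cs
        else 1 :: pvScanA nx ny rest cs
      | _ => (-1) :: pvScanA nx ny rest cs   -- row length ≠ 4: Python raises; excluded by Pre_

def pvMoves : List (Int × Int) := [(0,1), (0,-1), (1,0), (-1,0)]

-- body of `for move in moves`; state = (visited, q-after-popleft, checking_rec)
def pvMoveStep (rect2 : List (List Int)) (x y cnt : Int)
    (st : List (List Int) × List (Int × Int × Int) × List Int) (m : Int × Int) :
    List (List Int) × List (Int × Int × Int) × List Int :=
  let nx := x + m.1
  let ny := y + m.2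
  if ¬ (1 ≤ nx ∧ nx ≤ 100 ∧ 1 ≤ ny ∧ ny ≤ 100) then st
  else if pvCell st.1 nx ny = 1 then st
  else
    let cr' := pvScanA nx ny rect2 st.2.2
    if (-2 : Int) ∈ cr' ∨ ¬ ((1 : Int) ∈ cr') then (st.1, st.2.1, cr')
    else (pvSetCell st.1 nx ny 1, st.2.1 ++ [(nx, ny, cnt + 1)], cr')

-- `while q:` — fuel-guarded recursion (fuel only makes it total; 10203 > any possible pop count)
def pvRunA (rect2 : List (List Int)) (ix iy : Int) :
    Nat → List (Int × Int × Int) → List (List Int) → List Int → Int → Int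
  | 0, _, _, _, answer => answer
  | _ + 1, [], _, _, answer => answer
  | fuel + 1, (x, y, cnt) :: qrest, visited, cr, answer =>
    let answer' := if x = ix ∧ y = iy ∧ answer > cnt then cnt else answer
    let st := pvMoves.foldl (pvMoveStep rect2 x y cnt) (visited, qrest, cr)
    pvRunA rect2 ix iy fuel st.2.1 st.1 st.2.2 answer'

def solution (rectangle : List (List Int)) (characterX : Int) (characterY : Int) (itemX : Int) (itemY : Int) : Int :=
  let rect2 := rectangle.map pvDouble4
  let cx := characterX * 2
  let cy := characterY * 2
  let ix := itemX * 2
  let iy := itemY * 2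
  let visited0 := pvSetCell (List.replicate 101 (List.replicate 101 (0 : Int))) (pvWrap cx) (pvWrap cy) 1
  let cr0 : List Int := List.replicate rectangle.length 0
  PySem.Int.floordiv (pvRunA rect2 ix iy 10203 [(cx, cy, 0)] visited0 cr0 202) 2

-- ===== PORT B =====
-- `for i in range(4): rec[i] *= 2`
def pvDouble4B (rec : List Int) : List Int :=
  (PySem.List.pyRange 0 4 1).foldl (fun r i => PySem.List.pySetD r i (PySem.List.pyGetD r i 0 * 2)) rec

def pvInB (x y : Int) (rec : List Int) : Bool :=
  match rec with
  | [sx, sy, ex, ey] => decide (sx ≤ x ∧ x ≤ ex ∧ sy ≤ y ∧ y ≤ ey)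
  | _ => false       -- row length ≠ 4: Python raises on unpacking; excluded by Pre_

def pvStrict (x y : Int) (rec : List Int) : Bool :=
  match rec with
  | [sx, sy, ex, ey] => decide (sx < x ∧ x < ex ∧ sy < y ∧ y < ey)
  | _ => false       -- row length ≠ 4: Python raises on unpacking; excluded by Pre_

-- the set comprehension over the grid
def pvValid (rect2 : List (List Int)) : PySem.Set (Int × Int) :=
  PySem.Set.ofList ((PySem.List.pyRange 1 101 1).flatMap (fun x =>
    ((PySem.List.pyRange 1 101 1).filter (fun y =>
        rect2.any (pvInB x y) && !(rect2.any (pvStrict x y)))).map (fun y => (x, y))))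

-- body of `for n in ((x,y+1),(x,y-1),(x+1,y),(x-1,y))`; state = (dist, q-after-popleft)
def pvNbrStep (valid : PySem.Set (Int × Int)) (x y : Int)
    (st : PySem.Dict (Int × Int) Int × List (Int × Int)) (n : Int × Int) :
    PySem.Dict (Int × Int) Int × List (Int × Int) :=
  if PySem.Set.contains valid n && !(st.1.contains n) then
    (st.1.insert n (st.1.getD (x, y) 0 + 1), st.2 ++ [n])
  else st

def pvRunB (valid : PySem.Set (Int × Int)) (ix iy : Int) :
    Nat → List (Int × Int) → PySem.Dict (Int × Int) Int → Int → Int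
  | 0, _, _, best => best
  | _ + 1, [], _, best => best
  | fuel + 1, (x, y) :: qrest, dist, best =>
    let best' := if x = ix ∧ y = iy ∧ dist.getD (x, y) 0 < best then dist.getD (x, y) 0 else best
    let st := [(x, y + 1), (x, y - 1), (x + 1, y), (x - 1, y)].foldl (pvNbrStep valid x y) (dist, qrest)
    pvRunB valid ix iy fuel st.2 st.1 best'

def solution_alt (rectangle : List (List Int)) (characterX : Int) (characterY : Int) (itemX : Int) (itemY : Int) : Int :=
  let rect2 := rectangle.map pvDouble4B
  let cx := characterX * 2
  let cy := characterY * 2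
  let ix := itemX * 2
  let iy := itemY * 2
  let valid := pvValid rect2
  let dist0 := (PySem.Dict.empty (κ := Int × Int) (ν := Int)).insert (cx, cy) 0
  PySem.Int.floordiv (pvRunB valid ix iy 10203 [(cx, cy)] dist0 202) 2

-- ===== PRECONDITION & SPEC =====
-- Pre_ excludes exactly the inputs where A raises — a start coordinate outside [-50,50]
-- (IndexError on the 101×101 visited matrix) or a rectangle row without exactly 4 entries
-- (IndexError/ValueError) — except the degenerate corner where an over-long row is never
-- unpacked because the BFS never leaves an out-of-grid start (see claim cites).
def Pre_solution (rectangle : List (List Int)) (characterX : Int) (characterY : Int) (itemX : Int) (itemY : Int) : Prop :=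
  (∀ rec ∈ rectangle, rec.length = 4) ∧
  -50 ≤ characterX ∧ characterX ≤ 50 ∧ -50 ≤ characterY ∧ characterY ≤ 50

instance (rectangle : List (List Int)) (characterX : Int) (characterY : Int) (itemX : Int) (itemY : Int) : Decidable (Pre_solution rectangle characterX characterY itemX itemY) := by unfold Pre_solution; infer_instance

def pvWitness_solution : List (List Int) × Int × Int × Int × Int := ([[1, 1, 2, 2]], 1, 1, 2, 2)

def Spec_solution (rectangle : List (List Int)) (characterX : Int) (characterY : Int) (itemX : Int) (itemY : Int) (out : Int) : Prop := out = solution_alt rectangle characterX characterY itemX itemY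
instance (rectangle : List (List Int)) (characterX : Int) (characterY : Int) (itemX : Int) (itemY : Int) (out : Int) : Decidable (Spec_solution rectangle characterX characterY itemX itemY out) := by unfold Spec_solution; infer_instance

-- ===== CLAIM (what is proved, stated in full; the proofs are below) =====
def Claim_equal_solution : Prop := ∀ (rectangle : List (List Int)) (characterX : Int) (characterY : Int) (itemX : Int) (itemY : Int), Dom_solution rectangle characterX characterY itemX itemY → Pre_solution rectangle characterX characterY itemX itemY → Spec_solution rectangle characterX characterY itemX itemY (solution rectangle characterX characterY itemX itemY)

-- ===== LEMMAS AND PROOFS =====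

-- the two in-place doubling loops compute the same row
lemma pvDouble4B_eq (rec : List Int) : pvDouble4B rec = pvDouble4 rec := by
  have h : PySem.List.pyRange 0 4 1 = [0,1,2,3] := by decide
  simp only [pvDouble4B, pvDouble4, h, List.foldl]
  simp [PySem.List.pySetD_of_nonneg, PySem.List.pyGetD_of_nonneg]

-- membership in the precomputed set of passable cells
lemma pvValid_contains (rect2 : List (List Int)) (n : Int × Int) :
    PySem.Set.contains (pvValid rect2) n = true ↔
      (1 ≤ n.1 ∧ n.1 ≤ 100 ∧ 1 ≤ n.2 ∧ n.2 ≤ 100 ∧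
       rect2.any (pvInB n.1 n.2) = true ∧ rect2.any (pvStrict n.1 n.2) = false) := by
  obtain ⟨a, b⟩ := n
  simp only [PySem.Set.contains_iff, pvValid, PySem.Set.mem_ofList, List.mem_flatMap,
    List.mem_map, List.mem_filter, PySem.List.mem_pyRange_one, Bool.and_eq_true,
    Bool.not_eq_true', Prod.mk.injEq]
  constructor
  · rintro ⟨x, hx, y, ⟨hy, h1, h2⟩, rfl, rfl⟩
    exact ⟨by omega, by omega, by omega, by omega, h1, h2⟩
  · rintro ⟨h1, h2, h3, h4, h5, h6⟩
    exact ⟨a, ⟨by omega, by omega⟩, b, ⟨⟨by omega, by omega⟩, h5, h6⟩, rfl, rfl⟩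

lemma pvScanA_length (nx ny : Int) : ∀ (rs : List (List Int)) (cr : List Int),
    (pvScanA nx ny rs cr).length = cr.length := by
  intro rs
  induction rs with
  | nil => intro cr; rfl
  | cons rec rest ih =>
    intro cr
    match cr with
    | [] => rfl
    | c :: cs =>
      match rec with
      | [sx, sy, ex, ey] =>
        simp only [pvScanA]
        split_ifs <;> simp [ih]
      | [] => simp [pvScanA, ih]
      | [_] => simp [pvScanA, ih]
      | [_,_] => simp [pvScanA, ih]
      | [_,_,_] => simp [pvScanA, ih]
      | _::_::_::_::_::_ => simp [pvScanA, ih]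

lemma pvScanA_neg2 (nx ny : Int) : ∀ (rs : List (List Int)) (cr : List Int),
    cr.length = rs.length →
    ((-2 : Int) ∈ pvScanA nx ny rs cr ↔ rs.any (pvStrict nx ny) = true) := by
  intro rs
  induction rs with
  | nil =>
    intro cr h
    have : cr = [] := List.eq_nil_of_length_eq_zero h
    subst this; simp [pvScanA]
  | cons rec rest ih =>
    intro cr h
    match cr with
    | c :: cs =>
      have hlen : cs.length = rest.length := by simpa using h
      match rec with
      | [sx, sy, ex, ey] =>
        simp only [pvScanA]
        split_ifs with h1 h2
        · simp only [List.mem_cons, List.any_cons, Bool.or_eq_true]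
          rw [ih cs hlen]
          simp [pvStrict]
          omega
        · simp [List.any_cons, pvStrict, h2]
        · simp only [List.mem_cons, List.any_cons, Bool.or_eq_true]
          rw [ih cs hlen]
          simp [pvStrict]
          omega
      | [] => simp [pvScanA, ih cs hlen, pvStrict]
      | [_] => simp [pvScanA, ih cs hlen, pvStrict]
      | [_,_] => simp [pvScanA, ih cs hlen, pvStrict]
      | [_,_,_] => simp [pvScanA, ih cs hlen, pvStrict]
      | _::_::_::_::_::_ => simp [pvScanA, ih cs hlen, pvStrict]

lemma pvScanA_one (nx ny : Int) : ∀ (rs : List (List Int)) (cr : List Int),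
    cr.length = rs.length → rs.any (pvStrict nx ny) = false →
    ((1 : Int) ∈ pvScanA nx ny rs cr ↔ rs.any (pvInB nx ny) = true) := by
  intro rs
  induction rs with
  | nil =>
    intro cr h _
    have : cr = [] := List.eq_nil_of_length_eq_zero h
    subst this; simp [pvScanA]
  | cons rec rest ih =>
    intro cr h hs
    match cr with
    | c :: cs =>
      have hlen : cs.length = rest.length := by simpa using h
      simp only [List.any_cons, Bool.or_eq_false_iff] at hs
      obtain ⟨hs1, hs2⟩ := hs
      match rec with
      | [sx, sy, ex, ey] =>
        simp only [pvScanA]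
        split_ifs with h1 h2
        · simp only [List.mem_cons, List.any_cons, Bool.or_eq_true]
          rw [ih cs hlen hs2]
          simp [pvInB]
          omega
        · exact absurd (by simpa [pvStrict] using hs1) (by simpa using h2)
        · simp only [List.mem_cons, List.any_cons, Bool.or_eq_true]
          rw [ih cs hlen hs2]
          simp [pvInB]
          omega
      | [] => simp [pvScanA, ih cs hlen hs2, pvInB]
      | [_] => simp [pvScanA, ih cs hlen hs2, pvInB]
      | [_,_] => simp [pvScanA, ih cs hlen hs2, pvInB]
      | [_,_,_] => simp [pvScanA, ih cs hlen hs2, pvInB]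
      | _::_::_::_::_::_ => simp [pvScanA, ih cs hlen hs2, pvInB]


lemma pvShape_pvSetCell (v : List (List Int)) (a b w : Int)
    (h1 : v.length = 101) (h2 : ∀ r ∈ v, r.length = 101) (ha : a.toNat < 101) :
    (pvSetCell v a b w).length = 101 ∧ ∀ r ∈ pvSetCell v a b w, r.length = 101 := by
  refine ⟨by simp [pvSetCell, h1], ?_⟩
  intro r hr
  rcases List.mem_or_eq_of_mem_set hr with h | h
  · exact h2 r h
  · subst h
    have hlt : a.toNat < v.length := by omega
    have hmem : v.getD a.toNat [] ∈ v := by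
      rw [List.getD_eq_getElem v [] hlt]
      exact List.getElem_mem hlt
    simpa using h2 _ hmem

lemma pvCell_pvSetCell (v : List (List Int)) (a b i j w : Int)
    (h1 : v.length = 101) (h2 : ∀ r ∈ v, r.length = 101)
    (ha : 0 ≤ a) (ha2 : a ≤ 100) (hb : 0 ≤ b) (hb2 : b ≤ 100)
    (hi : 0 ≤ i) (hi2 : i ≤ 100) (hj : 0 ≤ j) (hj2 : j ≤ 100) :
    pvCell (pvSetCell v a b w) i j = if i = a ∧ j = b then w else pvCell v i j := by
  have haN : a.toNat < v.length := by omega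
  have hrow : v.getD a.toNat [] ∈ v := by
    rw [List.getD_eq_getElem v [] haN]
    exact List.getElem_mem haN
  have hrl : (v.getD a.toNat []).length = 101 := h2 _ hrow
  have hstep : (pvSetCell v a b w).getD i.toNat [] =
      if i.toNat = a.toNat then (v.getD a.toNat []).set b.toNat w else v.getD i.toNat [] := by
    unfold pvSetCell
    by_cases he : i.toNat = a.toNat
    · rw [if_pos he, List.getD_eq_getElem?_getD, List.getElem?_set, if_pos he.symm, if_pos haN]
      rfl
    · rw [if_neg he, List.getD_eq_getElem?_getD, List.getElem?_set,
        if_neg (fun hh => he hh.symm), ← List.getD_eq_getElem?_getD]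
  unfold pvCell
  rw [hstep]
  by_cases hia : i = a
  · rw [if_pos (by omega)]
    by_cases hjb : j = b
    · rw [if_pos ⟨hia, hjb⟩, List.getD_eq_getElem?_getD, List.getElem?_set,
        if_pos (by omega : b.toNat = j.toNat), if_pos (by omega)]
      rfl
    · rw [if_neg (by omega : ¬ (i = a ∧ j = b)), List.getD_eq_getElem?_getD,
        List.getElem?_set, if_neg (by omega), ← List.getD_eq_getElem?_getD, hia]
  · rw [if_neg (by omega), if_neg (by omega : ¬ (i = a ∧ j = b))]

-- the simulation relation between A's state and B's state
def pvRel (rect2 : List (List Int)) (visited : List (List Int)) (qA : List (Int × Int × Int))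
    (cr : List Int) (answer : Int)
    (dist : PySem.Dict (Int × Int) Int) (qB : List (Int × Int)) (best : Int) : Prop :=
  answer = best ∧
  cr.length = rect2.length ∧
  visited.length = 101 ∧ (∀ row ∈ visited, row.length = 101) ∧
  qA = qB.map (fun p => (p.1, p.2, dist.getD p 0)) ∧
  (∀ p ∈ qB, dist.contains p = true) ∧
  (∀ i j : Int, 1 ≤ i → i ≤ 100 → 1 ≤ j → j ≤ 100 →
    (pvCell visited i j = 1 ↔ dist.contains (i, j) = true))

lemma move_pres (rect2 : List (List Int)) (x y cnt answer best : Int) (m : Int × Int)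
    (n : Int × Int) (hn : n = (x + m.1, y + m.2))
    (stA : List (List Int) × List (Int × Int × Int) × List Int)
    (stB : PySem.Dict (Int × Int) Int × List (Int × Int))
    (h : pvRel rect2 stA.1 stA.2.1 stA.2.2 answer stB.1 stB.2 best)
    (hx : stB.1.contains (x, y) = true) (hcnt : cnt = stB.1.getD (x, y) 0) :
    pvRel rect2 (pvMoveStep rect2 x y cnt stA m).1
        (pvMoveStep rect2 x y cnt stA m).2.1
        (pvMoveStep rect2 x y cnt stA m).2.2 answer
        (pvNbrStep (pvValid rect2) x y stB n).1
        (pvNbrStep (pvValid rect2) x y stB n).2 best ∧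
      (pvNbrStep (pvValid rect2) x y stB n).1.contains (x, y) = true ∧
      cnt = (pvNbrStep (pvValid rect2) x y stB n).1.getD (x, y) 0 := by
  subst hn
  obtain ⟨visited, qA, cr⟩ := stA
  obtain ⟨dist, qB⟩ := stB
  dsimp only at h hx hcnt ⊢
  obtain ⟨hab, hcr, hvl, hvr, hq, hqd, hiff⟩ := h
  by_cases hr : (1 ≤ x + m.1 ∧ x + m.1 ≤ 100 ∧ 1 ≤ y + m.2 ∧ y + m.2 ≤ 100)
  case neg =>
    have hvalidF : PySem.Set.contains (pvValid rect2) (x + m.1, y + m.2) = false := by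
      rw [Bool.eq_false_iff]
      intro hc
      obtain ⟨a1, a2, a3, a4, _, _⟩ := (pvValid_contains rect2 _).1 hc
      exact hr ⟨a1, a2, a3, a4⟩
    have hAeq : pvMoveStep rect2 x y cnt (visited, qA, cr) m = (visited, qA, cr) := by
      simp only [pvMoveStep]
      rw [if_pos hr]
    have hBeq : pvNbrStep (pvValid rect2) x y (dist, qB) (x + m.1, y + m.2) = (dist, qB) := by
      unfold pvNbrStep
      rw [hvalidF]
      simp
    rw [hAeq, hBeq]
    exact ⟨⟨hab, hcr, hvl, hvr, hq, hqd, hiff⟩, hx, hcnt⟩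
  case pos =>
    obtain ⟨hr1, hr2, hr3, hr4⟩ := hr
    by_cases hv : pvCell visited (x + m.1) (y + m.2) = 1
    · -- already visited: both sides leave the state unchanged
      have hcT : dist.contains (x + m.1, y + m.2) = true :=
        (hiff _ _ hr1 hr2 hr3 hr4).1 hv
      have hAeq : pvMoveStep rect2 x y cnt (visited, qA, cr) m = (visited, qA, cr) := by
        simp only [pvMoveStep]
        rw [if_neg (not_not_intro ⟨hr1, hr2, hr3, hr4⟩), if_pos hv]
      have hBeq : pvNbrStep (pvValid rect2) x y (dist, qB) (x + m.1, y + m.2) = (dist, qB) := by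
        unfold pvNbrStep
        rw [hcT]
        simp
      rw [hAeq, hBeq]
      exact ⟨⟨hab, hcr, hvl, hvr, hq, hqd, hiff⟩, hx, hcnt⟩
    · have hcF : dist.contains (x + m.1, y + m.2) = false := by
        rw [Bool.eq_false_iff]
        intro hc
        exact hv ((hiff _ _ hr1 hr2 hr3 hr4).2 hc)
      by_cases hacc : rect2.any (pvStrict (x + m.1) (y + m.2)) = false ∧
          rect2.any (pvInB (x + m.1) (y + m.2)) = true
      · -- accepted: A marks the cell visited and pushes, B inserts into dist and pushes
        have hvalidT : PySem.Set.contains (pvValid rect2) (x + m.1, y + m.2) = true :=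
          (pvValid_contains rect2 _).2 ⟨hr1, hr2, hr3, hr4, hacc.2, hacc.1⟩
        have hscan2 : ¬ ((-2 : Int) ∈ pvScanA (x + m.1) (y + m.2) rect2 cr) := by
          rw [pvScanA_neg2 _ _ rect2 cr hcr]
          simp [hacc.1]
        have hscan1 : (1 : Int) ∈ pvScanA (x + m.1) (y + m.2) rect2 cr :=
          (pvScanA_one _ _ rect2 cr hcr hacc.1).2 hacc.2
        have hne : (x, y) ≠ (x + m.1, y + m.2) := by
          intro he
          rw [← he, hx] at hcF
          exact Bool.true_eq_false.mp hcF
        have hAeq : pvMoveStep rect2 x y cnt (visited, qA, cr) m =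
            (pvSetCell visited (x + m.1) (y + m.2) 1,
             qA ++ [(x + m.1, y + m.2, cnt + 1)],
             pvScanA (x + m.1) (y + m.2) rect2 cr) := by
          simp only [pvMoveStep]
          rw [if_neg (not_not_intro ⟨hr1, hr2, hr3, hr4⟩), if_neg hv,
            if_neg (not_or.mpr ⟨hscan2, not_not_intro hscan1⟩)]
        have hBeq : pvNbrStep (pvValid rect2) x y (dist, qB) (x + m.1, y + m.2) =
            (dist.insert (x + m.1, y + m.2) (dist.getD (x, y) 0 + 1),
             qB ++ [(x + m.1, y + m.2)]) := by
          unfold pvNbrStep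
          rw [hvalidT, hcF]
          simp
        rw [hAeq, hBeq]
        refine ⟨⟨hab, ?_, ?_, ?_, ?_, ?_, ?_⟩, ?_, ?_⟩
        · rw [pvScanA_length]
          exact hcr
        · exact (pvShape_pvSetCell visited _ _ 1 hvl hvr (by omega)).1
        · exact (pvShape_pvSetCell visited _ _ 1 hvl hvr (by omega)).2
        · -- queues stay in step
          rw [List.map_append, hq]
          dsimp only
          congr 1
          · apply List.map_congr_left
            intro p hp
            have hpc : dist.contains p = true := hqd p hp
            have hpn : p ≠ (x + m.1, y + m.2) := by
              intro he
              rw [he, hcF] at hpc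
              exact Bool.false_ne_true hpc
            rw [PySem.Dict.getD_insert, if_neg hpn]
          · simp [PySem.Dict.getD_insert_self, hcnt]
        · intro p hp
          rcases List.mem_append.1 hp with hp | hp
          · rw [PySem.Dict.contains_insert, hqd p hp, Bool.or_true]
          · simp only [List.mem_singleton] at hp
            subst hp
            exact PySem.Dict.contains_insert_self _ _ _
        · intro i j hi1 hi2 hj1 hj2
          rw [pvCell_pvSetCell visited _ _ i j 1 hvl hvr (by omega) (by omega) (by omega)
            (by omega) (by omega) (by omega) (by omega) (by omega)]
          rw [PySem.Dict.contains_insert]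
          by_cases he : i = x + m.1 ∧ j = y + m.2
          · simp [he]
          · rw [if_neg he, hiff i j hi1 hi2 hj1 hj2]
            have hbe : ((i, j) == (x + m.1, y + m.2)) = false := by
              simp only [beq_eq_false_iff_ne, ne_eq, Prod.mk.injEq]
              exact fun hh => he hh
            rw [hbe, Bool.false_or]
        · rw [PySem.Dict.contains_insert, hx, Bool.or_true]
        · rw [PySem.Dict.getD_insert, if_neg hne, hcnt]
      · -- rejected by the rectangles: A only updates checking_rec, B skips
        have hvalidF : PySem.Set.contains (pvValid rect2) (x + m.1, y + m.2) = false := by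
          rw [Bool.eq_false_iff]
          intro hc
          obtain ⟨_, _, _, _, b1, b2⟩ := (pvValid_contains rect2 _).1 hc
          exact hacc ⟨b2, b1⟩
        have hrej : (-2 : Int) ∈ pvScanA (x + m.1) (y + m.2) rect2 cr ∨
            ¬ (1 : Int) ∈ pvScanA (x + m.1) (y + m.2) rect2 cr := by
          by_cases hstrict : rect2.any (pvStrict (x + m.1) (y + m.2)) = false
          · right
            rw [pvScanA_one _ _ rect2 cr hcr hstrict]
            intro hinb
            exact hacc ⟨hstrict, hinb⟩
          · left
            rw [pvScanA_neg2 _ _ rect2 cr hcr]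
            exact Bool.not_eq_false _ |>.mp hstrict
        have hAeq : pvMoveStep rect2 x y cnt (visited, qA, cr) m =
            (visited, qA, pvScanA (x + m.1) (y + m.2) rect2 cr) := by
          simp only [pvMoveStep]
          rw [if_neg (not_not_intro ⟨hr1, hr2, hr3, hr4⟩), if_neg hv, if_pos hrej]
        have hBeq : pvNbrStep (pvValid rect2) x y (dist, qB) (x + m.1, y + m.2) = (dist, qB) := by
          unfold pvNbrStep
          rw [hvalidF]
          simp
        rw [hAeq, hBeq]
        refine ⟨⟨hab, ?_, hvl, hvr, hq, hqd, hiff⟩, hx, hcnt⟩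
        rw [pvScanA_length]
        exact hcr

lemma run_eq (rect2 : List (List Int)) (ix iy : Int) :
    ∀ (fuel : Nat) (qA : List (Int × Int × Int)) (visited : List (List Int)) (cr : List Int)
      (answer : Int) (qB : List (Int × Int)) (dist : PySem.Dict (Int × Int) Int) (best : Int),
      pvRel rect2 visited qA cr answer dist qB best →
      pvRunA rect2 ix iy fuel qA visited cr answer =
        pvRunB (pvValid rect2) ix iy fuel qB dist best := by
  intro fuel
  induction fuel with
  | zero =>
    intro qA visited cr answer qB dist best h
    simp [pvRunA, pvRunB, h.1]
  | succ f ih =>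
    intro qA visited cr answer qB dist best h
    obtain ⟨hab, hcr, hvl, hvr, hq, hqd, hiff⟩ := h
    cases qB with
    | nil =>
      simp only [List.map_nil] at hq
      subst hq
      simp [pvRunA, pvRunB, hab]
    | cons p rest =>
      obtain ⟨px, py⟩ := p
      subst hq
      simp only [List.map_cons, pvRunA, pvRunB]
      rw [hab]
      simp only [gt_iff_lt, pvMoves, List.foldl_cons, List.foldl_nil]
      have hx0 : dist.contains (px, py) = true := hqd _ (List.mem_cons_self)
      have hrel0 : pvRel rect2 visited (List.map (fun p => (p.1, p.2, dist.getD p 0)) rest) cr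
          (if px = ix ∧ py = iy ∧ dist.getD (px, py) 0 < best then dist.getD (px, py) 0 else best)
          dist rest
          (if px = ix ∧ py = iy ∧ dist.getD (px, py) 0 < best then dist.getD (px, py) 0 else best) :=
        ⟨rfl, hcr, hvl, hvr, rfl, fun q hq' => hqd q (List.mem_cons_of_mem _ hq'), hiff⟩
      have h1 := move_pres rect2 px py (dist.getD (px, py) 0) _ _ (0, 1) (px, py + 1)
        (by simp)
        (visited, List.map (fun p => (p.1, p.2, dist.getD p 0)) rest, cr) (dist, rest)
        hrel0 hx0 rfl
      have h2 := move_pres rect2 px py (dist.getD (px, py) 0) _ _ (0, -1) (px, py - 1)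
        (by simp; ring) _ _ h1.1 h1.2.1 h1.2.2
      have h3 := move_pres rect2 px py (dist.getD (px, py) 0) _ _ (1, 0) (px + 1, py)
        (by simp) _ _ h2.1 h2.2.1 h2.2.2
      have h4 := move_pres rect2 px py (dist.getD (px, py) 0) _ _ (-1, 0) (px - 1, py)
        (by simp; ring) _ _ h3.1 h3.2.1 h3.2.2
      exact ih _ _ _ _ _ _ _ h4.1

lemma pvCell_base (i j : Int) :
    pvCell (List.replicate 101 (List.replicate 101 (0 : Int))) i j = 0 := by
  unfold pvCell
  by_cases h : i.toNat < 101
  · have hrow : (List.replicate 101 (List.replicate 101 (0 : Int))).getD i.toNat [] =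
        List.replicate 101 (0 : Int) := by
      rw [List.getD_eq_getElem _ _ (by rw [List.length_replicate]; omega)]
      exact List.getElem_replicate _
    rw [hrow]
    rcases Nat.lt_or_ge j.toNat 101 with hj | hj
    · rw [List.getD_eq_getElem _ _ (by rw [List.length_replicate]; omega)]
      exact List.getElem_replicate _
    · rw [List.getD_eq_getElem?_getD,
        List.getElem?_eq_none (by rw [List.length_replicate]; omega), Option.getD_none]
  · have hrow : (List.replicate 101 (List.replicate 101 (0 : Int))).getD i.toNat [] =
        ([] : List Int) := by
      rw [List.getD_eq_getElem?_getD,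
        List.getElem?_eq_none (by rw [List.length_replicate]; omega), Option.getD_none]
    rw [hrow]
    rfl

lemma base_shape : (List.replicate 101 (List.replicate 101 (0 : Int))).length = 101 ∧
    ∀ r ∈ List.replicate 101 (List.replicate 101 (0 : Int)), r.length = 101 := by
  refine ⟨by simp, ?_⟩
  intro r hr
  rw [List.eq_of_mem_replicate hr]
  simp

-- ===== VERDICT (by name: the statement is the Claim_ definition above) =====
theorem solution_spec : Claim_equal_solution := by
  unfold Claim_equal_solution Spec_solution
  intro rectangle cX cY iX iY hdom hpre
  obtain ⟨hlen, hc1, hc2, hc3, hc4⟩ := hpre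
  unfold solution solution_alt
  dsimp only
  rw [List.map_congr_left (fun r _ => pvDouble4B_eq r)]
  congr 1
  by_cases hneg : cX < 0 ∨ cY < 0
  · -- the (wrapped) start lies outside the grid: both BFS loops stop after the first pop
    have hb : cX * 2 ≤ -2 ∨ cY * 2 ≤ -2 := by omega
    have hstep : ∀ (st : List (List Int) × List (Int × Int × Int) × List Int) (a b : Int),
        -1 ≤ a → a ≤ 1 → -1 ≤ b → b ≤ 1 →
        pvMoveStep (rectangle.map pvDouble4) (cX * 2) (cY * 2) 0 st (a, b) = st := by
      intro st a b ha1 ha2 hb1 hb2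
      unfold pvMoveStep
      rw [if_pos (by dsimp only; omega)]
    have hnstep : ∀ (st : PySem.Dict (Int × Int) Int × List (Int × Int)) (n : Int × Int),
        (n.1 ≤ 0 ∨ n.2 ≤ 0) →
        pvNbrStep (pvValid (rectangle.map pvDouble4)) (cX * 2) (cY * 2) st n = st := by
      intro st n hn
      have hcF : PySem.Set.contains (pvValid (rectangle.map pvDouble4)) n = false := by
        rw [Bool.eq_false_iff]
        intro hc
        obtain ⟨a1, a2, a3, a4, _, _⟩ := (pvValid_contains _ _).1 hc
        omega
      unfold pvNbrStep
      rw [hcF]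
      simp
    rw [(by rfl : (10203 : Nat) = 10202 + 1), (by rfl : (10202 : Nat) = 10201 + 1)]
    simp only [pvRunA, pvRunB, pvMoves, List.foldl_cons, List.foldl_nil]
    rw [hstep _ 0 1 (by omega) (by omega) (by omega) (by omega),
      hstep _ 0 (-1) (by omega) (by omega) (by omega) (by omega),
      hstep _ 1 0 (by omega) (by omega) (by omega) (by omega),
      hstep _ (-1) 0 (by omega) (by omega) (by omega) (by omega)]
    rw [hnstep _ (cX * 2, cY * 2 + 1) (by dsimp only; omega),
      hnstep _ (cX * 2, cY * 2 - 1) (by dsimp only; omega),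
      hnstep _ (cX * 2 + 1, cY * 2) (by dsimp only; omega),
      hnstep _ (cX * 2 - 1, cY * 2) (by dsimp only; omega)]
    simp only [pvRunA, pvRunB, gt_iff_lt, PySem.Dict.getD_insert_self]
  · -- the start cell is stored without wrap-around; run the simulation
    push_neg at hneg
    apply run_eq
    have hwx : pvWrap (cX * 2) = cX * 2 := by
      unfold pvWrap
      rw [if_neg (by omega)]
    have hwy : pvWrap (cY * 2) = cY * 2 := by
      unfold pvWrap
      rw [if_neg (by omega)]
    rw [hwx, hwy]
    have hshape := pvShape_pvSetCell (List.replicate 101 (List.replicate 101 (0 : Int)))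
      (cX * 2) (cY * 2) 1 base_shape.1 base_shape.2 (by omega)
    refine ⟨rfl, by simp, hshape.1, hshape.2, ?_, ?_, ?_⟩
    · simp [PySem.Dict.getD_insert_self]
    · intro p hp
      simp only [List.mem_singleton] at hp
      subst hp
      exact PySem.Dict.contains_insert_self _ _ _
    · intro i j hi1 hi2 hj1 hj2
      rw [pvCell_pvSetCell _ _ _ i j 1 base_shape.1 base_shape.2 (by omega) (by omega)
        (by omega) (by omega) (by omega) (by omega) (by omega) (by omega)]
      rw [PySem.Dict.contains_insert, PySem.Dict.contains_empty, Bool.or_false]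
      by_cases he : i = cX * 2 ∧ j = cY * 2
      · simp [he]
      · rw [if_neg he, pvCell_base]
        constructor
        · intro h01
          exact absurd h01 (by norm_num)
        · intro hbeq
          exact absurd ((beq_iff_eq).1 hbeq) (by simpa [Prod.ext_iff] using he)
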